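-- pv_equiv track=rewrite | github.com/makssokol/python_algos | L7/task_3.py | mediana
-- ===== SOURCE A (Python) =====
-- def mediana(array):
--
--     for i in range(len(array)):
--         less = []
--         more = []
--         eq = []
--         for j in range(len(array)):
--             if array[j] < array[i]:
--                 less.append(array[j])
--             elif array[j] > array[i]:
--                 more.append(array[j])
--             else:
--                 eq.append(j)
--         if len(less) == len(more) or (len(eq) > 1 and abs(len(more) - len(less)) < len(eq)):
--             return array[i]
-- ===== SOURCE B (Python) =====
-- def mediana(array):
--     # counts per value, then prefix sums over the sorted distinct values:
--     # for each value v, less[v] = #elements < v, cnt[v] = #elements == v.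
--     cnt = {}
--     for x in array:
--         cnt[x] = cnt.get(x, 0) + 1
--     less = {}
--     acc = 0
--     for k in sorted(cnt):
--         less[k] = acc
--         acc += cnt[k]
--     n = len(array)
--     for x in array:
--         l = less[x]
--         e = cnt[x]
--         m = n - l - e
--         if l == m or (e > 1 and abs(m - l) < e):
--             return x
--     return None
-- ===== Notes on version B (the rewrite author's own statement) =====
-- stated objective: faster
-- what changed: Replaces the per-element O(n) partition scan with one counting pass plus prefix sums over the sorted distinct values, so each element's less/equal/greater counts become O(1) lookups.
import Mathlib
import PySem

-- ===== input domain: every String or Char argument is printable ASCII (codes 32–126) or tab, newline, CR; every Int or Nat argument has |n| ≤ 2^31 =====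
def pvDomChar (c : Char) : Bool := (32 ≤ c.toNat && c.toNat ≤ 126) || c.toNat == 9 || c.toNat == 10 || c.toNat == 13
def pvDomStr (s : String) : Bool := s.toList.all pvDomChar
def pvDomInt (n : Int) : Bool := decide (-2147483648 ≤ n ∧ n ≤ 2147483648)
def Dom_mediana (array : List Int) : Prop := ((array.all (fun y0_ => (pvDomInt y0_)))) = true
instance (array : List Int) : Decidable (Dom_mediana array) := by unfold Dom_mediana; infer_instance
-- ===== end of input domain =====

-- B replaces A's per-element partition scan by a counting pass plus prefix sums over the
-- sorted distinct values (faster: one O(n log n) preprocessing instead of an O(n) scan per element).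


-- ===== PORT A =====
-- inner 'for j in range(len(array))' loop; the j-index is always in range, so the pyGetD default is never read
def medianaInner (array : List Int) (ai : Int) : List Int × List Int × List Int :=
  (PySem.List.pyRange 0 (array.length : Int) 1).foldl
    (fun (s : List Int × List Int × List Int) j =>
      let aj := PySem.List.pyGetD array j 0
      if aj < ai then (s.1 ++ [aj], s.2.1, s.2.2)
      else if aj > ai then (s.1, s.2.1 ++ [aj], s.2.2)
      else (s.1, s.2.1, s.2.2 ++ [j]))
    ([], [], [])

-- outer 'for i in range(len(array))' loop with its early return
def medianaGo (array : List Int) : List Int → Option Int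
  | [] => none
  | i :: rest =>
    let ai := PySem.List.pyGetD array i 0
    let t := medianaInner array ai
    if t.1.length = t.2.1.length ∨
        (1 < t.2.2.length ∧ |(t.2.1.length : Int) - (t.1.length : Int)| < (t.2.2.length : Int)) then
      some ai
    else medianaGo array rest

def mediana (array : List Int) : Option Int :=
  medianaGo array (PySem.List.pyRange 0 (array.length : Int) 1)

-- ===== PORT B =====
def mediana_alt (array : List Int) : Option Int :=
  let cnt := array.foldl (fun (d : PySem.Dict Int Int) x => d.insert x (d.getD x 0 + 1)) PySem.Dict.empty
  -- prefix-sum loop over sorted(cnt); the looked-up keys are always present, so getD's default is never read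
  let p := (PySem.List.sorted cnt.keys (fun k => k) false).foldl
    (fun (s : PySem.Dict Int Int × Int) k => (s.1.insert k s.2, s.2 + cnt.getD k 0))
    (PySem.Dict.empty, 0)
  let less := p.1
  let n : Int := array.length
  array.find? (fun x =>
    let l := less.getD x 0
    let e := cnt.getD x 0
    let m := n - l - e
    decide (l = m ∨ (1 < e ∧ |m - l| < e)))

-- ===== PRECONDITION & SPEC =====
def Spec_mediana (array : List Int) (out : Option Int) : Prop := out = mediana_alt array
instance (array : List Int) (out : Option Int) : Decidable (Spec_mediana array out) := by unfold Spec_mediana; infer_instance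

-- ===== CLAIM (what is proved, stated in full; the proofs are below) =====
def Claim_equal_mediana : Prop := ∀ (array : List Int), Dom_mediana array → Spec_mediana array (mediana array)

-- ===== LEMMAS AND PROOFS =====

-- the three counts both programs' conditions are really about
def aCnt (array : List Int) (v : Int) : Nat := array.countP (fun y => decide (y < v))
def bCnt (array : List Int) (v : Int) : Nat := array.countP (fun y => decide (v < y))
def eCnt (array : List Int) (v : Int) : Nat := array.count v

def pA (array : List Int) (v : Int) : Bool :=
  decide (aCnt array v = bCnt array v ∨
    (1 < eCnt array v ∧ |(bCnt array v : Int) - (aCnt array v : Int)| < (eCnt array v : Int)))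

-- ---- A side: characterise the inner partition loop ----

theorem inner_fold (array : List Int) (ai : Int) :
    ∀ (js : List Int) (L M E : List Int),
    js.foldl
      (fun (s : List Int × List Int × List Int) j =>
        let aj := PySem.List.pyGetD array j 0
        if aj < ai then (s.1 ++ [aj], s.2.1, s.2.2)
        else if aj > ai then (s.1, s.2.1 ++ [aj], s.2.2)
        else (s.1, s.2.1, s.2.2 ++ [j])) (L, M, E)
    = (L ++ (js.filter (fun j => decide (PySem.List.pyGetD array j 0 < ai))).map
            (fun j => PySem.List.pyGetD array j 0),
       M ++ (js.filter (fun j => decide (ai < PySem.List.pyGetD array j 0))).map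
            (fun j => PySem.List.pyGetD array j 0),
       E ++ js.filter (fun j => decide (PySem.List.pyGetD array j 0 = ai))) := by
  intro js
  induction js with
  | nil => intro L M E; simp
  | cons j t ih =>
    intro L M E
    rw [List.foldl_cons]
    rcases lt_trichotomy (PySem.List.pyGetD array j 0) ai with h | h | h
    · have h1 : ¬ ai < PySem.List.pyGetD array j 0 := by omega
      have h2 : ¬ PySem.List.pyGetD array j 0 = ai := by omega
      simp only [h, h1, h2, if_pos, if_neg, not_false_iff, gt_iff_lt,
        decide_eq_true_eq, List.filter_cons]
      rw [ih]
      simp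
    · have h1 : ¬ PySem.List.pyGetD array j 0 < ai := by omega
      have h2 : ¬ ai < PySem.List.pyGetD array j 0 := by omega
      simp only [gt_iff_lt, h1, h2, ite_false, List.filter_cons, decide_eq_true h]
      rw [ih]
      simp
    · have h1 : ¬ PySem.List.pyGetD array j 0 < ai := by omega
      have h2 : ¬ PySem.List.pyGetD array j 0 = ai := by omega
      simp only [gt_iff_lt, h, h1, ite_true, List.filter_cons, decide_eq_false h2]
      rw [ih]
      simp

theorem inner_eq (array : List Int) (ai : Int) :
    medianaInner array ai
      = (array.filter (fun y => decide (y < ai)),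
         array.filter (fun y => decide (ai < y)),
         (PySem.List.pyRange 0 (array.length : Int) 1).filter
           (fun j => decide (PySem.List.pyGetD array j 0 = ai))) := by
  unfold medianaInner
  rw [inner_fold]
  have hmap := PySem.List.map_pyGetD_pyRange_zero' array 0
  simp only [List.nil_append, Prod.mk.injEq]
  refine ⟨?_, ?_, trivial⟩
  · rw [show (fun j => decide (PySem.List.pyGetD array j 0 < ai))
        = ((fun v => decide (v < ai)) ∘ (fun j => PySem.List.pyGetD array j 0)) from rfl]
    rw [← List.filter_map, hmap]
  · rw [show (fun j => decide (ai < PySem.List.pyGetD array j 0))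
        = ((fun v => decide (ai < v)) ∘ (fun j => PySem.List.pyGetD array j 0)) from rfl]
    rw [← List.filter_map, hmap]

theorem inner_trd_len (array : List Int) (ai : Int) :
    (medianaInner array ai).2.2.length = array.count ai := by
  rw [inner_eq]
  dsimp only
  rw [← List.countP_eq_length_filter,
      show (fun j => decide (PySem.List.pyGetD array j 0 = ai))
        = ((fun v => decide (v = ai)) ∘ (fun j => PySem.List.pyGetD array j 0)) from rfl,
      ← List.countP_map, PySem.List.map_pyGetD_pyRange_zero' array 0, List.count_eq_countP]
  apply List.countP_congr
  intro x hx
  by_cases hxa : x = ai <;> simp [hxa]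

theorem cond_iff (array : List Int) (v : Int) :
    ((medianaInner array v).1.length = (medianaInner array v).2.1.length ∨
      (1 < (medianaInner array v).2.2.length ∧
        |((medianaInner array v).2.1.length : Int) - ((medianaInner array v).1.length : Int)|
          < ((medianaInner array v).2.2.length : Int)))
    ↔ pA array v = true := by
  have h3 := inner_trd_len array v
  rw [inner_eq] at h3 ⊢
  unfold pA aCnt bCnt eCnt
  dsimp only at h3 ⊢
  rw [h3]
  simp [List.countP_eq_length_filter]

theorem go_eq (array : List Int) (js : List Int) :
    medianaGo array js
      = (js.map (fun j => PySem.List.pyGetD array j 0)).find? (pA array) := by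
  induction js with
  | nil => rfl
  | cons i rest ih =>
    unfold medianaGo
    rw [List.map_cons, List.find?_cons]
    cases h : pA array (PySem.List.pyGetD array i 0)
    · rw [if_neg (fun hcond => by rw [cond_iff array _] at hcond; simp [h] at hcond), ih]
    · rw [if_pos ((cond_iff array _).mpr h)]

theorem mediana_eq_find (array : List Int) :
    mediana array = array.find? (pA array) := by
  unfold mediana
  rw [go_eq, PySem.List.map_pyGetD_pyRange_zero' array 0]
-- ---- B side: the counter, the prefix-sum dict, and the partition identity ----

def altCnt (array : List Int) : PySem.Dict Int Int :=
  array.foldl (fun (d : PySem.Dict Int Int) x => d.insert x (d.getD x 0 + 1)) PySem.Dict.empty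

def altLess (array : List Int) : PySem.Dict Int Int :=
  ((PySem.List.sorted (altCnt array).keys (fun k => k) false).foldl
    (fun (s : PySem.Dict Int Int × Int) k => (s.1.insert k s.2, s.2 + (altCnt array).getD k 0))
    (PySem.Dict.empty, 0)).1

theorem alt_unfold (array : List Int) :
    mediana_alt array = array.find? (fun x =>
      decide ((altLess array).getD x 0
          = (array.length : Int) - (altLess array).getD x 0 - (altCnt array).getD x 0 ∨
        (1 < (altCnt array).getD x 0 ∧
          |(array.length : Int) - (altLess array).getD x 0 - (altCnt array).getD x 0
             - (altLess array).getD x 0| < (altCnt array).getD x 0))) := rfl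

theorem altCnt_getD (array : List Int) (x : Int) :
    (altCnt array).getD x 0 = (array.count x : Int) := by
  unfold altCnt
  rw [PySem.Dict.getD_foldl_insert_add_one]
  simp

theorem altCnt_keys (array : List Int) : (altCnt array).keys = PySem.Set.ofList array := by
  unfold altCnt
  rw [PySem.Dict.foldl_insert_getD_add_one_eq_counter, PySem.Dict.keys_counter]

-- a fold of inserts at keys ≠ x never changes the entry at x
theorem fold_untouched (c : Int → Int) :
    ∀ (ks : List Int) (d : PySem.Dict Int Int) (acc x : Int), x ∉ ks →
    ((ks.foldl (fun (s : PySem.Dict Int Int × Int) k => (s.1.insert k s.2, s.2 + c k))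
        (d, acc)).1).getD x 0 = d.getD x 0 := by
  intro ks
  induction ks with
  | nil => intro d acc x _; rfl
  | cons k t ih =>
    intro d acc x hx
    rw [List.foldl_cons]
    rw [ih _ _ _ (fun h => hx (List.mem_cons_of_mem _ h))]
    exact PySem.Dict.getD_insert_of_ne d acc 0 (by rintro rfl; exact hx List.mem_cons_self)

-- on a strictly increasing key list the prefix-sum fold stores, at each key x,
-- acc plus the sum of c over the keys before (i.e. smaller than) x
theorem prefix_fold (c : Int → Int) :
    ∀ (ks : List Int), ks.Pairwise (· < ·) →
    ∀ (d : PySem.Dict Int Int) (acc x : Int), x ∈ ks →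
    ((ks.foldl (fun (s : PySem.Dict Int Int × Int) k => (s.1.insert k s.2, s.2 + c k))
        (d, acc)).1).getD x 0
      = acc + ((ks.filter (fun k => decide (k < x))).map c).sum := by
  intro ks
  induction ks with
  | nil => intro _ d acc x hx; cases hx
  | cons k t ih =>
    intro hpw d acc x hx
    have hk : ∀ y ∈ t, k < y := fun y hy => (List.pairwise_cons.mp hpw).1 y hy
    rw [List.foldl_cons]
    rcases List.mem_cons.mp hx with rfl | hxt
    · have hxnot : x ∉ t := fun h => lt_irrefl x (hk x h)
      rw [fold_untouched c t _ _ _ hxnot]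
      rw [show ((d, acc).1.insert x (d, acc).2) = d.insert x acc from rfl,
          PySem.Dict.getD_insert_self]
      have : (x :: t).filter (fun k' => decide (k' < x)) = [] := by
        rw [List.filter_cons, decide_eq_false (lt_irrefl x)]
        simp only [Bool.false_eq_true, if_false]
        rw [List.filter_eq_nil_iff.mpr]
        intro y hy
        simp [not_lt.mpr (le_of_lt (hk y hy))]
      rw [this]
      simp
    · have hkx : k < x := hk x hxt
      rw [ih (List.pairwise_cons.mp hpw).2 _ _ _ hxt]
      rw [List.filter_cons, decide_eq_true hkx]
      simp [add_assoc]

-- counting with a predicate equals summing the multiplicities over the distinct values satisfying it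
theorem countP_split (array : List Int) (p : Int → Bool) (k : Int) :
    array.countP p = (array.filter (fun y => y == k)).countP p
      + (array.filter (fun y => !(y == k))).countP p := by
  induction array with
  | nil => rfl
  | cons a t ih =>
    by_cases h1 : (a == k) = true <;> by_cases h2 : p a = true <;>
      simp [h1, h2, ih] <;> omega

theorem countP_eq_sum (p : Int → Bool) :
    ∀ (ks array : List Int), ks.Nodup → (∀ y ∈ array, y ∈ ks) →
    array.countP p = ((ks.filter p).map (fun k => array.count k)).sum := by
  intro ks
  induction ks with
  | nil =>
    intro array _ hcov
    have : array = [] := List.eq_nil_iff_forall_not_mem.mpr (fun a ha => List.not_mem_nil (hcov a ha))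
    subst this; rfl
  | cons k t ih =>
    intro array hnd hcov
    have hknt : k ∉ t := (List.nodup_cons.mp hnd).1
    have hsplit := countP_split array p k
    have hfirst : (array.filter (fun y => y == k)).countP p
        = if p k then array.count k else 0 := by
      rw [List.filter_beq]
      simp [List.countP_replicate]
    have hcov' : ∀ y ∈ array.filter (fun y => !(y == k)), y ∈ t := by
      intro y hy
      rcases List.mem_filter.mp hy with ⟨hya, hyk⟩
      have hne : y ≠ k := by simpa using hyk
      rcases List.mem_cons.mp (hcov y hya) with rfl | h
      · exact absurd rfl hne
      · exact h
    have hih := ih (array.filter (fun y => !(y == k))) (List.nodup_cons.mp hnd).2 hcov'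
    have hcnt : ∀ k' ∈ t.filter p,
        (array.filter (fun y => !(y == k))).count k' = array.count k' := by
      intro k' hk'
      have hne : k' ≠ k := fun h => hknt (h ▸ (List.mem_filter.mp hk').1)
      exact List.count_filter (by simp [hne])
    rw [hsplit, hfirst, hih, List.map_congr_left hcnt, List.filter_cons]
    by_cases hp : p k = true <;> simp [hp]

-- every element falls in exactly one of the three classes
theorem counts_partition (array : List Int) (v : Int) :
    aCnt array v + eCnt array v + bCnt array v = array.length := by
  unfold aCnt bCnt eCnt
  induction array with
  | nil => rfl
  | cons x t ih =>
    simp only [List.countP_cons, List.count_cons, List.length_cons]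
    rcases lt_trichotomy x v with h | h | h
    · simp only [decide_eq_true h, decide_eq_false (not_lt_of_gt h),
        beq_eq_false_iff_ne.mpr (ne_of_lt h)]
      simp only [if_true]
      simp only [Bool.false_eq_true, if_false]
      omega
    · subst h
      simp only [decide_eq_false (lt_irrefl x), BEq.rfl, if_true]
      simp only [Bool.false_eq_true, if_false]
      omega
    · simp only [decide_eq_true h, decide_eq_false (not_lt_of_gt h),
        beq_eq_false_iff_ne.mpr (ne_of_gt h)]
      simp only [if_true]
      simp only [Bool.false_eq_true, if_false]
      omega

theorem altLess_getD (array : List Int) (x : Int) (hx : x ∈ array) :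
    (altLess array).getD x 0 = (aCnt array x : Int) := by
  unfold altLess
  have hkeys := altCnt_keys array
  have hnodup : (PySem.List.sorted (altCnt array).keys (fun k => k) false).Nodup := by
    rw [hkeys]
    exact ((PySem.List.sorted_perm _ _ _).symm).nodup (PySem.Set.nodup_ofList array)
  have hle : (PySem.List.sorted (altCnt array).keys (fun k => k) false).Pairwise
      (fun a b => (fun k => k) a ≤ (fun k => k) b) :=
    PySem.List.sorted_pairwise (altCnt array).keys (fun k => k)
  have hpw : (PySem.List.sorted (altCnt array).keys (fun k => k) false).Pairwise (· < ·) :=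
    (hle.and hnodup).imp (fun h => lt_of_le_of_ne h.1 h.2)
  have hmem : x ∈ PySem.List.sorted (altCnt array).keys (fun k => k) false := by
    rw [PySem.List.mem_sorted, hkeys, PySem.Set.mem_ofList]
    exact hx
  rw [prefix_fold _ _ hpw _ _ _ hmem, zero_add]
  set ks := PySem.List.sorted (altCnt array).keys (fun k => k) false with hks
  rw [List.map_congr_left (fun k _ => altCnt_getD array k)]
  have hcov : ∀ y ∈ array, y ∈ ks := by
    intro y hy
    rw [hks, PySem.List.mem_sorted, hkeys, PySem.Set.mem_ofList]
    exact hy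
  have hnat := countP_eq_sum (fun y => decide (y < x)) ks array hnodup hcov
  unfold aCnt
  rw [hnat, Nat.cast_list_sum, List.map_map]
  rfl

theorem find_congr (l : List Int) (p q : Int → Bool) (h : ∀ x ∈ l, p x = q x) :
    l.find? p = l.find? q := by
  induction l with
  | nil => rfl
  | cons x t ih =>
    simp only [List.find?_cons]
    rw [h x List.mem_cons_self]
    cases q x
    · exact ih (fun y hy => h y (List.mem_cons_of_mem _ hy))
    · rfl

theorem alt_eq_find (array : List Int) :
    mediana_alt array = array.find? (pA array) := by
  rw [alt_unfold]
  apply find_congr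
  intro x hx
  have hpart := counts_partition array x
  rw [altLess_getD array x hx, altCnt_getD array x]
  have hm : (array.length : Int) - (aCnt array x : Int) - (array.count x : Int)
      = (bCnt array x : Int) := by
    have : (aCnt array x : Int) + (eCnt array x : Int) + (bCnt array x : Int)
        = (array.length : Int) := by exact_mod_cast congrArg (Nat.cast (R := Int)) hpart
    unfold eCnt at this
    omega
  rw [hm]
  unfold pA eCnt
  simp [Nat.one_lt_cast]

-- ===== VERDICT (by name: the statement is the Claim_ definition above) =====
theorem mediana_spec : Claim_equal_mediana := by
  intro array _
  unfold Spec_mediana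
  rw [mediana_eq_find, alt_eq_find]
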